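-- pv_equiv track=rewrite | github.com/Phani-8649/Dsa | 1894-find-the-student-that-will-replace-the-chalk/1894-find-the-student-that-will-replace-the-chalk.py | chalkReplacer
-- ===== SOURCE A (Python) =====
-- def chalkReplacer(chalk, k):
--     """
--     :type chalk: List[int]
--     :type k: int
--     :rtype: int
--     """
--     k=k%sum(chalk)
--     n=len(chalk)
--     i=0
--     while True:
--         k-=chalk[i]
--         if(k<0):
--             return i
--         i=(i+1)%n
-- ===== SOURCE B (Python) =====
-- def chalkReplacer(chalk, k):
--     prefix = []
--     t = 0
--     for c in chalk:
--         t += c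
--         prefix.append(t)
--     k %= t
--     for i, p in enumerate(prefix):
--         if p > k:
--             return i
--     return len(prefix)
-- ===== Notes on version B (the rewrite author's own statement) =====
-- stated objective: alternative
-- what changed: B precomputes the prefix-sum array and returns the index of the first prefix exceeding k % total, replacing A's destructive subtract-and-wrap `while True` loop (which mutates k and wraps the index modulo n, and can loop forever); B always terminates.
import Mathlib
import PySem

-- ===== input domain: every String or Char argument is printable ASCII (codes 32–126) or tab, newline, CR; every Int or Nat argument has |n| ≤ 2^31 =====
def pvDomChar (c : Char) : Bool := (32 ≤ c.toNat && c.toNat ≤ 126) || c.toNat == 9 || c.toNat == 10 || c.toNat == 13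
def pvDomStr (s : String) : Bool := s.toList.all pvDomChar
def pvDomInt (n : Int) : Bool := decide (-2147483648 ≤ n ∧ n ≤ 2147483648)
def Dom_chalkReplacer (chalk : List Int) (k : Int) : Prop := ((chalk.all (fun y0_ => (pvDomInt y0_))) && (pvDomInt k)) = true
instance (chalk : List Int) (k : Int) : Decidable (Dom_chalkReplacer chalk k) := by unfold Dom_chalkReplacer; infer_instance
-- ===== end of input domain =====

-- B precomputes the prefix-sum array and returns the index of the first prefix exceeding
-- k % total, replacing A's destructive subtract-and-wrap `while True` loop; B always terminates.


-- ===== PORT A =====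
-- A's `while True` loop; the fuel (chalk.length) only makes the function total: on every
-- input admitted by Pre_ the loop returns within the first pass, so fuel is never exhausted.
def pvGoA (chalk : List Int) : Nat → Int → Nat → Int
  | 0, _, _ => 0
  | f+1, k, i =>
    let k' := k - chalk.getD i 0
    if k' < 0 then (i : Int)
    else pvGoA chalk f k' ((i+1) % chalk.length)

def chalkReplacer (chalk : List Int) (k : Int) : Int :=
  let s := chalk.sum
  if s = 0 then 0   -- Python raises ZeroDivisionError here; excluded by Pre_
  else pvGoA chalk chalk.length (PySem.Int.mod k s) 0

-- ===== PORT B =====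
-- the prefix-building for-loop of Source B
def pvPrefix : List Int → Int → List Int
  | [], _ => []
  | c :: rest, t => (t + c) :: pvPrefix rest (t + c)

-- the enumerate-and-return for-loop of Source B (i is the enumerate counter; the final
-- `return len(prefix)` is the fall-through arm)
def pvScan : List Int → Int → Nat → Int
  | [], _, i => (i : Int)
  | p :: rest, k, i => if p > k then (i : Int) else pvScan rest k (i+1)

def chalkReplacer_alt (chalk : List Int) (k : Int) : Int :=
  let pre := pvPrefix chalk 0
  let t := chalk.sum   -- the running total t ends at the sum of chalk
  if t = 0 then 0      -- Python raises ZeroDivisionError here; excluded by Pre_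
  else pvScan pre (PySem.Int.mod k t) 0

-- ===== PRECONDITION & SPEC =====
-- Pre_ is exactly where the Python A returns: sum = 0 raises ZeroDivisionError, and when no
-- prefix sum exceeds k % sum within the first pass (possible only for a negative sum) the
-- `while True` loop never terminates; A never returns a value outside Pre_.
def Pre_chalkReplacer (chalk : List Int) (k : Int) : Prop :=
  chalk.sum ≠ 0 ∧ ∃ i < chalk.length, PySem.Int.mod k chalk.sum < (chalk.take (i+1)).sum
instance (chalk : List Int) (k : Int) : Decidable (Pre_chalkReplacer chalk k) := by
  unfold Pre_chalkReplacer; infer_instance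

def pvWitness_chalkReplacer : List Int × Int := ([5, 1, 5], 22)

def Spec_chalkReplacer (chalk : List Int) (k : Int) (out : Int) : Prop := out = chalkReplacer_alt chalk k
instance (chalk : List Int) (k : Int) (out : Int) : Decidable (Spec_chalkReplacer chalk k out) := by unfold Spec_chalkReplacer; infer_instance

-- ===== CLAIM (what is proved, stated in full; the proofs are below) =====
def Claim_equal_chalkReplacer : Prop := ∀ (chalk : List Int) (k : Int), Dom_chalkReplacer chalk k → Pre_chalkReplacer chalk k → Spec_chalkReplacer chalk k (chalkReplacer chalk k)

-- ===== LEMMAS AND PROOFS =====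

theorem pvPrefix_length (chalk : List Int) (t : Int) :
    (pvPrefix chalk t).length = chalk.length := by
  induction chalk generalizing t with
  | nil => rfl
  | cons c rest ih => simp [pvPrefix, ih]

theorem pvPrefix_getD (chalk : List Int) (t : Int) (j : Nat) (hj : j < chalk.length) :
    (pvPrefix chalk t).getD j 0 = t + (chalk.take (j+1)).sum := by
  induction chalk generalizing t j with
  | nil => simp at hj
  | cons c rest ih =>
    cases j with
    | zero => simp [pvPrefix]
    | succ j =>
      simp only [pvPrefix, List.getD_cons_succ, List.take_succ_cons, List.sum_cons]
      rw [ih (t + c) j (by simpa using hj)]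
      ring

-- A's loop returns the least index whose prefix sum exceeds k'
theorem goA_eq_find (chalk : List Int) (k' : Int)
    (hex : ∃ i, k' < (chalk.take (i+1)).sum)
    (hfind : Nat.find hex < chalk.length) :
    ∀ f i kk, i + f = chalk.length →
      kk = k' - (chalk.take i).sum →
      (∀ j, j < i → ¬ (k' < (chalk.take (j+1)).sum)) →
      pvGoA chalk f kk i = ((Nat.find hex : Nat) : Int) := by
  intro f
  induction f with
  | zero =>
    intro i kk hfi hkk hno
    exfalso
    exact hno (Nat.find hex) (by omega) (Nat.find_spec hex)
  | succ f ih =>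
    intro i kk hfi hkk hno
    have hi : i < chalk.length := by omega
    have hget : chalk.getD i 0 = chalk[i] := List.getD_eq_getElem chalk 0 hi
    have htake : (chalk.take (i+1)).sum = (chalk.take i).sum + chalk[i] := by
      rw [List.take_add_one, List.sum_append]
      simp [List.getElem?_eq_getElem hi]
    simp only [pvGoA]
    by_cases hneg : kk - chalk.getD i 0 < 0
    · simp only [hneg, if_true]
      congr 1
      symm
      rw [Nat.find_eq_iff]
      refine ⟨?_, ?_⟩
      · rw [hget, hkk] at hneg; omega
      · intro j hj; exact hno j hj
    · simp only [hneg, if_false]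
      have hcross : ¬ (k' < (chalk.take (i+1)).sum) := by
        rw [hget, hkk] at hneg; omega
      have hi1 : i + 1 < chalk.length := by
        by_contra hge
        have hfs := Nat.find_spec hex
        have hlt : Nat.find hex < i + 1 := by omega
        rcases Nat.lt_succ_iff_lt_or_eq.mp hlt with h' | h'
        · exact hno _ h' hfs
        · rw [h'] at hfs; exact hcross hfs
      have hmod : (i+1) % chalk.length = i + 1 := Nat.mod_eq_of_lt hi1
      rw [hmod]
      apply ih (i+1) _ (by omega)
      · rw [hkk, hget, htake]; ring
      · intro j hj
        rcases Nat.lt_succ_iff_lt_or_eq.mp hj with hj' | hj'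
        · exact hno j hj'
        · subst hj'; exact hcross

-- B's scan over the prefix array returns the same least index
theorem scan_eq_find (chalk : List Int) (k' : Int)
    (hex : ∃ i, k' < (chalk.take (i+1)).sum)
    (hfind : Nat.find hex < chalk.length) :
    ∀ l i, l = (pvPrefix chalk 0).drop i →
      (∀ j, j < i → ¬ (k' < (chalk.take (j+1)).sum)) →
      pvScan l k' i = ((Nat.find hex : Nat) : Int) := by
  intro l
  induction l with
  | nil =>
    intro i hdrop hno
    exfalso
    have hlen : (pvPrefix chalk 0).length ≤ i := by
      by_contra hc
      have : (pvPrefix chalk 0).drop i ≠ [] := by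
        apply List.ne_nil_of_length_pos
        rw [List.length_drop]
        omega
      exact this hdrop.symm
    rw [pvPrefix_length] at hlen
    exact hno (Nat.find hex) (by omega) (Nat.find_spec hex)
  | cons p rest ih =>
    intro i hdrop hno
    have hi : i < chalk.length := by
      by_contra hc
      have hnil : (pvPrefix chalk 0).drop i = [] := by
        apply List.drop_eq_nil_of_le
        rw [pvPrefix_length]
        omega
      rw [hnil] at hdrop
      simp at hdrop
    have hilen : i < (pvPrefix chalk 0).length := by rw [pvPrefix_length]; exact hi
    have hdec : p :: rest = (pvPrefix chalk 0)[i] :: (pvPrefix chalk 0).drop (i+1) :=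
      hdrop.trans (List.drop_eq_getElem_cons hilen)
    injection hdec with hphead hrest
    have hp : p = (chalk.take (i+1)).sum := by
      have h0 : (pvPrefix chalk 0).getD i 0 = (chalk.take (i+1)).sum := by
        rw [pvPrefix_getD chalk 0 i hi]; ring
      have hget : (pvPrefix chalk 0).getD i 0 = (pvPrefix chalk 0)[i] :=
        List.getD_eq_getElem _ 0 hilen
      rw [hphead, ← hget, h0]
    simp only [pvScan]
    by_cases hcmp : p > k'
    · simp only [hcmp, if_true]
      congr 1
      symm
      rw [Nat.find_eq_iff]
      exact ⟨by rw [← hp]; exact hcmp, fun j hj => hno j hj⟩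
    · simp only [hcmp, if_false]
      apply ih (i+1)
      · exact hrest
      · intro j hj
        rcases Nat.lt_succ_iff_lt_or_eq.mp hj with hj' | hj'
        · exact hno j hj'
        · subst hj'
          rw [← hp]
          exact hcmp

-- ===== VERDICT (by name: the statement is the Claim_ definition above) =====
theorem chalkReplacer_spec : Claim_equal_chalkReplacer := by
  intro chalk k _hdom hpre
  obtain ⟨hs0, i0, hi0, hcross0⟩ := hpre
  unfold Spec_chalkReplacer chalkReplacer chalkReplacer_alt
  simp only [hs0, if_false]
  set k' := PySem.Int.mod k chalk.sum with hk'
  have hex : ∃ i, k' < (chalk.take (i+1)).sum := ⟨i0, hcross0⟩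
  have hfind : Nat.find hex < chalk.length :=
    lt_of_le_of_lt (Nat.find_min' hex hcross0) hi0
  have hA : pvGoA chalk chalk.length k' 0 = ((Nat.find hex : Nat) : Int) := by
    apply goA_eq_find chalk k' hex hfind chalk.length 0 k' (by omega) (by simp)
    intro j hj; omega
  have hB : pvScan (pvPrefix chalk 0) k' 0 = ((Nat.find hex : Nat) : Int) := by
    apply scan_eq_find chalk k' hex hfind (pvPrefix chalk 0) 0 (by simp)
    intro j hj; omega
  rw [hA, hB]
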